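-- pv_equiv track=rewrite | github.com/ting1011/2026-python | weeks/week-10/solutions/1114405022/QUESTION-10252.py | solve
-- ===== SOURCE A (Python) =====
-- from collections import Counter
--
-- def solve(data: str) -> str:
--     lines = data.splitlines()
--     out = []
--
--     i = 0
--     while i + 1 < len(lines):
--         a = lines[i]
--         b = lines[i + 1]
--         i += 2
--
--         ca = Counter(a)
--         cb = Counter(b)
--
--         common = []
--         for ch in sorted(ca.keys() & cb.keys()):
--             common.append(ch * min(ca[ch], cb[ch]))
--
--         out.append("".join(common))
--
--     return "\n".join(out)
-- ===== SOURCE B (Python) =====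
-- def _common(sa, sb):
--     # two-pointer merge over two sorted character lists: sorted multiset intersection
--     res = []
--     i = j = 0
--     while i < len(sa) and j < len(sb):
--         if sa[i] == sb[j]:
--             res.append(sa[i])
--             i += 1
--             j += 1
--         elif sa[i] < sb[j]:
--             i += 1
--         else:
--             j += 1
--     return res
--
-- def solve(data: str) -> str:
--     lines = data.splitlines()
--     out = []
--     i = 0
--     while i + 1 < len(lines):
--         out.append("".join(_common(sorted(lines[i]), sorted(lines[i + 1]))))
--         i += 2
--     return "\n".join(out)
-- ===== Notes on version B (the rewrite author's own statement) =====
-- stated objective: alternative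
-- what changed: Per line pair, B computes the common characters by a two-pointer merge over the two sorted character lists instead of building two Counters, intersecting their key sets and repeating each key min(count) times.
import Mathlib
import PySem

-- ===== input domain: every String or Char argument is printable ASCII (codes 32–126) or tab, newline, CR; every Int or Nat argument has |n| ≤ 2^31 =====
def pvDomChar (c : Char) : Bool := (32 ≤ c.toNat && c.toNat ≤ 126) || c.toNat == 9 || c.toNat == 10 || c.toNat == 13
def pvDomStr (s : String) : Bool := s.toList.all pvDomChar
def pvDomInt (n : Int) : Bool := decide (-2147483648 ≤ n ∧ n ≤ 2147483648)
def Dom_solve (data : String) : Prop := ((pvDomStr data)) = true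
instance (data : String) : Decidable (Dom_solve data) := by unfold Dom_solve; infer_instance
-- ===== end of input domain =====

-- B replaces A's Counter-intersection per line pair by a two-pointer merge of the two
-- sorted character lists (same cost class; a genuinely different algorithm, no Counter).

-- ===== PORT A =====
-- one iteration of A's while-loop body: Counter both lines, sorted key-set intersection,
-- each key repeated min(count) times, joined with ''.
def solvePairA (a b : String) : String :=
  let ca := PySem.Dict.counter a.toList
  let cb := PySem.Dict.counter b.toList
  let common : List String :=
    (PySem.List.sorted (PySem.Set.inter ca.keys cb.keys) (fun c => c) false).foldl
      (fun acc ch =>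
        acc ++ [String.ofList (List.replicate (min (ca.getD ch 0) (cb.getD ch 0)).toNat ch)]) []
  PySem.Str.join "" common

-- A's 'while i + 1 < len(lines): … i += 2' consumes the lines two at a time.
def solveLoopA : List String → List String
  | a :: b :: rest => solvePairA a b :: solveLoopA rest
  | _ => []

def solve (data : String) : String :=
  PySem.Str.join "\n" (solveLoopA (PySem.Str.splitlines data))

-- ===== PORT B =====
-- Source B's _common: two-pointer merge over two sorted char lists.
def mergeCommon : List Char → List Char → List Char
  | x :: xs, y :: ys =>
    if x = y then x :: mergeCommon xs ys
    else if x < y then mergeCommon xs (y :: ys)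
    else mergeCommon (x :: xs) ys
  | _, _ => []
termination_by l1 l2 => l1.length + l2.length

def solvePairB (a b : String) : String :=
  String.ofList (mergeCommon (PySem.List.sorted a.toList (fun c => c) false)
                             (PySem.List.sorted b.toList (fun c => c) false))

def solveLoopB : List String → List String
  | a :: b :: rest => solvePairB a b :: solveLoopB rest
  | _ => []

def solve_alt (data : String) : String :=
  PySem.Str.join "\n" (solveLoopB (PySem.Str.splitlines data))

-- ===== PRECONDITION & SPEC =====
def Spec_solve (data : String) (out : String) : Prop := out = solve_alt data
instance (data : String) (out : String) : Decidable (Spec_solve data out) := by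
  unfold Spec_solve; infer_instance

-- ===== CLAIM (what is proved, stated in full; the proofs are below) =====
def Claim_equal_solve : Prop := ∀ (data : String), Dom_solve data → Spec_solve data (solve data)

-- ===== LEMMAS AND PROOFS =====

theorem join_nil_flatten (xss : List (List Char)) : PySem.Chars.join [] xss = xss.flatten := by
  induction xss with
  | nil => rfl
  | cons a t ih =>
    cases t with
    | nil => simp [PySem.Chars.join_singleton]
    | cons b r => simp [PySem.Chars.join_cons_cons, ih]

theorem toList_join_empty (parts : List String) :
    (PySem.Str.join "" parts).toList = (parts.map String.toList).flatten := by
  simp [PySem.Str.toList_join, join_nil_flatten]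

theorem mem_mergeCommon_left (l1 l2 : List Char) (c : Char) (h : c ∈ mergeCommon l1 l2) :
    c ∈ l1 := by
  fun_induction mergeCommon l1 l2 with
  | case1 xs y ys ih =>
      rcases List.mem_cons.mp h with h | h
      · simp [h]
      · exact List.mem_cons_of_mem _ (ih h)
  | case2 x xs y ys hne hlt ih => exact List.mem_cons_of_mem _ (ih h)
  | case3 x xs y ys hne hnlt ih => exact ih h
  | case4 l1 l2 hc => simp at h

theorem pairwise_mergeCommon (l1 l2 : List Char) (h1 : l1.Pairwise (· ≤ ·)) :
    (mergeCommon l1 l2).Pairwise (· ≤ ·) := by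
  fun_induction mergeCommon l1 l2 with
  | case1 xs y ys ih =>
      rcases List.pairwise_cons.mp h1 with ⟨hy, hxs⟩
      exact List.pairwise_cons.mpr
        ⟨fun z hz => hy z (mem_mergeCommon_left _ _ _ hz), ih hxs⟩
  | case2 x xs y ys hne hlt ih => exact ih (List.pairwise_cons.mp h1).2
  | case3 x xs y ys hne hnlt ih => exact ih h1
  | case4 l1 l2 hc => simp

theorem count_zero_of_lt (y : Char) (ys : List Char) (h : (y :: ys).Pairwise (· ≤ ·))
    (c : Char) (hc : c < y) : (y :: ys).count c = 0 := by
  rw [List.count_eq_zero]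
  intro hmem
  rcases List.mem_cons.mp hmem with rfl | hmem
  · exact lt_irrefl c hc
  · exact lt_irrefl c (lt_of_lt_of_le hc ((List.pairwise_cons.mp h).1 c hmem))

theorem count_mergeCommon (l1 l2 : List Char)
    (h1 : l1.Pairwise (· ≤ ·)) (h2 : l2.Pairwise (· ≤ ·)) (c : Char) :
    (mergeCommon l1 l2).count c = min (l1.count c) (l2.count c) := by
  fun_induction mergeCommon l1 l2 with
  | case1 xs y ys ih =>
      have hih := ih (List.pairwise_cons.mp h1).2 (List.pairwise_cons.mp h2).2
      simp only [List.count_cons, hih]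
      split_ifs <;> omega
  | case2 x xs y ys hne hlt ih =>
      rw [ih (List.pairwise_cons.mp h1).2 h2]
      by_cases hc : c = x
      · subst hc
        have h0 : (y :: ys).count c = 0 := count_zero_of_lt y ys h2 c hlt
        simp [h0]
      · have hx : (x == c) = false := beq_eq_false_iff_ne.mpr (fun h => hc h.symm)
        simp [List.count_cons, hx]
  | case3 x xs y ys hne hnlt ih =>
      rw [ih h1 (List.pairwise_cons.mp h2).2]
      have hyx : y < x := lt_of_le_of_ne (not_lt.mp hnlt) (fun h => hne h.symm)
      by_cases hc : c = y
      · subst hc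
        have h0 : (x :: xs).count c = 0 := count_zero_of_lt x xs h1 c hyx
        simp [h0]
      · have hy : (y == c) = false := beq_eq_false_iff_ne.mpr (fun h => hc h.symm)
        simp [List.count_cons, hy]
  | case4 l1 l2 hc =>
      cases l1 with
      | nil => simp
      | cons a as =>
        cases l2 with
        | nil => simp
        | cons b bs => exact (hc a as b bs rfl rfl).elim

theorem count_flatMap_replicate (keys : List Char) (f : Char → Nat) (c : Char)
    (hnd : keys.Nodup) :
    ((keys.map (fun k => List.replicate (f k) k)).flatten).count c
      = if c ∈ keys then f c else 0 := by
  induction keys with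
  | nil => simp
  | cons k t ih =>
    have hk : k ∉ t := (List.nodup_cons.mp hnd).1
    have iht := ih (List.nodup_cons.mp hnd).2
    by_cases hc : c = k
    · subst hc
      simp [List.count_append, iht, hk]
    · simp [List.count_append, List.count_replicate, iht, hc, Ne.symm hc]

theorem pairwise_flatMap_replicate (keys : List Char) (f : Char → Nat)
    (h : keys.Pairwise (· < ·)) :
    ((keys.map (fun k => List.replicate (f k) k)).flatten).Pairwise (· ≤ ·) := by
  induction keys with
  | nil => simp
  | cons k t ih =>
    rcases List.pairwise_cons.mp h with ⟨hk, ht⟩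
    rw [List.map_cons, List.flatten_cons]
    apply List.pairwise_append.mpr
    refine ⟨?_, ih ht, ?_⟩
    · exact List.pairwise_replicate.mpr (Or.inr (le_refl k))
    · intro x hx y hy
      rcases List.mem_flatten.mp hy with ⟨l', hl', hy'⟩
      rcases List.mem_map.mp hl' with ⟨k', hk', rfl⟩
      rw [List.eq_of_mem_replicate hx, List.eq_of_mem_replicate hy']
      exact le_of_lt (hk k' hk')

theorem sorted_nodup_pairwise_lt (xs : List Char) (h : xs.Nodup) :
    (PySem.List.sorted xs (fun c => c) false).Pairwise (· < ·) := by
  have hle : (PySem.List.sorted xs (fun c => c) false).Pairwise (· ≤ ·) := by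
    simpa using PySem.List.sorted_pairwise xs (fun c : Char => c)
  have hnd : (PySem.List.sorted xs (fun c => c) false).Nodup :=
    ((PySem.List.sorted_perm (xs := xs) (key := fun c => c) (rev := false)).nodup_iff).mpr h
  exact (hle.and hnd).imp (fun hab => lt_of_le_of_ne hab.1 hab.2)

theorem solvePair_eq (a b : String) : solvePairA a b = solvePairB a b := by
  apply String.toList_inj.mp
  unfold solvePairA solvePairB
  simp only [PySem.Dict.keys_counter, PySem.Dict.getD_counter,
    PySem.List.foldl_append_singleton_eq_map, List.nil_append]
  rw [toList_join_empty]
  simp only [List.map_map, Function.comp_def, String.toList_ofList]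
  -- abbreviations
  set keys := PySem.List.sorted
      (PySem.Set.inter (PySem.Set.ofList a.toList) (PySem.Set.ofList b.toList))
      (fun c => c) false with hkeys
  set sa := PySem.List.sorted a.toList (fun c => c) false with hsa
  set sb := PySem.List.sorted b.toList (fun c => c) false with hsb
  have hmin : ∀ ch : Char,
      ((min ((a.toList.count ch : Int)) ((b.toList.count ch : Int))).toNat)
        = min (a.toList.count ch) (b.toList.count ch) := by
    intro ch
    omega
  have hndkeys : keys.Pairwise (· < ·) := by
    rw [hkeys]
    exact sorted_nodup_pairwise_lt _
      (PySem.Set.nodup_inter _ _ (PySem.Set.nodup_ofList _))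
  have hmemkeys : ∀ c : Char, c ∈ keys ↔ c ∈ a.toList ∧ c ∈ b.toList := by
    intro c
    rw [hkeys, PySem.List.mem_sorted, PySem.Set.mem_inter,
      PySem.Set.mem_ofList, PySem.Set.mem_ofList]
  have hsa_pw : sa.Pairwise (· ≤ ·) := by
    rw [hsa]; simpa using PySem.List.sorted_pairwise a.toList (fun c : Char => c)
  have hsb_pw : sb.Pairwise (· ≤ ·) := by
    rw [hsb]; simpa using PySem.List.sorted_pairwise b.toList (fun c : Char => c)
  have hcount : ∀ c : Char,
      (((keys.map (fun ch =>
        List.replicate ((min ((a.toList.count ch : Int)) ((b.toList.count ch : Int))).toNat) ch)).flatten).count c)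
        = (mergeCommon sa sb).count c := by
    intro c
    rw [count_mergeCommon sa sb hsa_pw hsb_pw c]
    rw [List.Perm.count_eq (PySem.List.sorted_perm (xs := a.toList) (key := fun c => c) (rev := false)),
        List.Perm.count_eq (PySem.List.sorted_perm (xs := b.toList) (key := fun c => c) (rev := false))]
    rw [count_flatMap_replicate _ _ _ hndkeys.nodup]
    by_cases hc : c ∈ keys
    · simp [hc, hmin c]
    · simp only [hc, if_false]
      rcases not_and_or.mp ((hmemkeys c).not.mp hc) with h | h
      · rw [List.count_eq_zero.mpr h]
        simp
      · rw [List.count_eq_zero.mpr h]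
        simp
  have hperm : (((keys.map (fun ch =>
      List.replicate ((min ((a.toList.count ch : Int)) ((b.toList.count ch : Int))).toNat) ch)).flatten)).Perm
      (mergeCommon sa sb) := List.perm_iff_count.mpr hcount
  have hpwA : (((keys.map (fun ch =>
      List.replicate ((min ((a.toList.count ch : Int)) ((b.toList.count ch : Int))).toNat) ch)).flatten)).Pairwise
      (· ≤ ·) := pairwise_flatMap_replicate _ _ hndkeys
  have hpwB : (mergeCommon sa sb).Pairwise (· ≤ ·) := pairwise_mergeCommon _ _ hsa_pw
  exact hperm.eq_of_pairwise (fun a b _ _ hab hba => le_antisymm hab hba) hpwA hpwB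

theorem solveLoop_eq (l : List String) : solveLoopA l = solveLoopB l := by
  fun_induction solveLoopA l with
  | case1 a b rest ih => simp [solveLoopB, solvePair_eq, ih]
  | case2 l hc =>
    cases l with
    | nil => simp [solveLoopB]
    | cons a t =>
      cases t with
      | nil => simp [solveLoopB]
      | cons b r => exact (hc a b r rfl).elim

-- ===== VERDICT (by name: the statement is the Claim_ definition above) =====
theorem solve_spec : Claim_equal_solve := by
  intro data _
  unfold Spec_solve solve solve_alt
  rw [solveLoop_eq]
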